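-- pv_equiv track=rewrite | github.com/bledidalipaj/codefights | challenges/python/groupedbits.py | GroupedBits
-- ===== SOURCE A (Python) =====
-- def GroupedBits(n):
--     res = 0
--     count = True
--     for bit in bin(n):
--         if count and bit == '1':
--             res += 1
--             count = False
--         if bit == '0':
--             count = True
--     return res
-- ===== SOURCE B (Python) =====
-- def GroupedBits(n):
--     # Bit trick: m ^ (m << 1) has a set bit at each boundary of a run of 1s,
--     # and every run contributes exactly two boundaries.
--     m = abs(n)
--     return (m ^ (m << 1)).bit_count() // 2
-- ===== Notes on version B (the rewrite author's own statement) =====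
-- stated objective: idiomatic
-- what changed: Replaces the stateful character scan of bin(n) with the standard bit-trick: runs of 1s in abs(n) are counted as half the popcount of m ^ (m << 1), whose set bits mark run boundaries.
import Mathlib
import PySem

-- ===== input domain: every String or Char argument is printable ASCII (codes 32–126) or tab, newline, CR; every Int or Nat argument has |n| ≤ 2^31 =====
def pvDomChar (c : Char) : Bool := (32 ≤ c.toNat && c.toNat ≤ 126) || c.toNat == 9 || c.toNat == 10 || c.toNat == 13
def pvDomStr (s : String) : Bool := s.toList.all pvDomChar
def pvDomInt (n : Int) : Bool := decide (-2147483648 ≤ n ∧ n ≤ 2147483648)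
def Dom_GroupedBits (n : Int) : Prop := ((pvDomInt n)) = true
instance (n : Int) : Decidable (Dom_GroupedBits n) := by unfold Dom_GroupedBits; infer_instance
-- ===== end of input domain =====

-- B counts 1-runs of |n| by the bit trick popcount(m ^ (m << 1)) // 2 instead of A's stateful scan of bin(n).

-- ===== PORT A =====
-- one iteration of A's for-loop over the characters of bin(n); state = (res, count)
def pyStep (s : Int × Bool) (c : Char) : Int × Bool :=
  let s1 := if s.2 && (c == '1') then (s.1 + 1, false) else s
  if c == '0' then (s1.1, true) else s1

def GroupedBits (n : Int) : Int :=
  ((PySem.Int.toBinChars0b n).foldl pyStep (0, true)).1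

-- ===== PORT B =====
def GroupedBits_alt (n : Int) : Int :=
  let m : Int := |n|
  let x : Int := PySem.Int.bxor m (m <<< (1 : Nat))   -- m ^ (m << 1)
  PySem.Int.floordiv (PySem.Int.bitCount x : Int) 2   -- .bit_count() // 2

-- ===== PRECONDITION & SPEC =====
def Spec_GroupedBits (n : Int) (out : Int) : Prop := out = GroupedBits_alt n
instance (n : Int) (out : Int) : Decidable (Spec_GroupedBits n out) := by unfold Spec_GroupedBits; infer_instance

-- ===== CLAIM (what is proved, stated in full; the proofs are below) =====
def Claim_equal_GroupedBits : Prop := ∀ (n : Int), Dom_GroupedBits n → Spec_GroupedBits n (GroupedBits n)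

-- ===== LEMMAS AND PROOFS =====

-- number of maximal runs of 1-bits of a natural number (reference function of the proof)
def runs (m : Nat) : Nat :=
  if m = 0 then 0
  else (if m % 2 = 1 ∧ (m / 2) % 2 = 0 then 1 else 0) + runs (m / 2)
termination_by m
decreasing_by exact Nat.div_lt_self (by omega) (by omega)

-- msb-first binary digits, the list Nat.toDigits 2 produces
def binDigits (m : Nat) : List Char :=
  if h : m < 2 then [Nat.digitChar m]
  else binDigits (m / 2) ++ [Nat.digitChar (m % 2)]
termination_by m
decreasing_by exact Nat.div_lt_self (by omega) (by omega)

lemma runs_zero : runs 0 = 0 := by rw [runs]; simp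
lemma runs_one : runs 1 = 1 := by rw [runs]; norm_num [runs_zero]
lemma runs_step (m : Nat) (h : m ≠ 0) :
    runs m = (if m % 2 = 1 ∧ (m / 2) % 2 = 0 then 1 else 0) + runs (m / 2) := by
  rw [runs]; simp [h]

lemma binDigits_lt_two (m : Nat) (h : m < 2) : binDigits m = [Nat.digitChar m] := by
  rw [binDigits]; simp [h]
lemma binDigits_step (m : Nat) (h : ¬ m < 2) :
    binDigits m = binDigits (m / 2) ++ [Nat.digitChar (m % 2)] := by
  rw [binDigits]; simp [h]

lemma toDigitsCore_eq (f : Nat) : ∀ (n : Nat) (l : List Char), n ≤ f →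
    Nat.toDigitsCore 2 (f + 1) n l = binDigits n ++ l := by
  induction f with
  | zero =>
    intro n l h
    have hn : n = 0 := by omega
    subst hn
    simp [Nat.toDigitsCore, binDigits_lt_two]
  | succ f ih =>
    intro n l h
    have step : Nat.toDigitsCore 2 (f + 1 + 1) n l =
        if n / 2 = 0 then (n % 2).digitChar :: l
        else Nat.toDigitsCore 2 (f + 1) (n / 2) ((n % 2).digitChar :: l) := rfl
    by_cases hz : n / 2 = 0
    · have h2 : n < 2 := by omega
      rw [step, if_pos hz, binDigits_lt_two n h2, Nat.mod_eq_of_lt h2]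
      rfl
    · have h2 : ¬ n < 2 := by omega
      rw [step, if_neg hz, ih (n / 2) _ (by omega), binDigits_step n h2,
        List.append_assoc]
      rfl

lemma toDigits_two (m : Nat) : Nat.toDigits 2 m = binDigits m := by
  have := toDigitsCore_eq m m [] le_rfl
  simpa [Nat.toDigits] using this

lemma pyStep_dash (s : Int × Bool) : pyStep s '-' = s := by
  simp [pyStep]
lemma pyStep_b (s : Int × Bool) : pyStep s 'b' = s := by
  simp [pyStep]
lemma pyStep_zero (s : Int × Bool) : pyStep s '0' = (s.1, true) := by
  simp [pyStep]
lemma pyStep_one_true (x : Int) : pyStep (x, true) '1' = (x + 1, false) := by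
  simp [pyStep]
lemma pyStep_one_false (x : Int) : pyStep (x, false) '1' = (x, false) := by
  simp [pyStep]

lemma digitChar_zero : Nat.digitChar 0 = '0' := rfl
lemma digitChar_one : Nat.digitChar 1 = '1' := rfl

-- the scan of the digit list counts run starts; count=false at entry hides the leading run
lemma fold_bin (m : Nat) : 1 ≤ m → ∀ r : Int,
    (binDigits m).foldl pyStep (r, true) = (r + (runs m : Int), decide (m % 2 = 0)) ∧
    (binDigits m).foldl pyStep (r, false) = (r + (runs m : Int) - 1, decide (m % 2 = 0)) := by
  induction m using Nat.strong_induction_on with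
  | _ m ih =>
    intro hm r
    by_cases h2 : m < 2
    · have hm1 : m = 1 := by omega
      subst hm1
      rw [binDigits_lt_two 1 (by norm_num), digitChar_one]
      constructor <;>
        simp [List.foldl_cons, List.foldl_nil, pyStep_one_true, pyStep_one_false, runs_one]
    · have h1 : 1 ≤ m / 2 := by omega
      have hlt : m / 2 < m := Nat.div_lt_self (by omega) (by omega)
      obtain ⟨ht, hf⟩ := ih (m / 2) hlt h1 r
      rw [binDigits_step m h2]
      simp only [List.foldl_append, ht, hf]
      rw [runs_step m (by omega)]
      rcases Nat.mod_two_eq_zero_or_one m with hm2 | hm2 <;>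
        rcases Nat.mod_two_eq_zero_or_one (m / 2) with hq2 | hq2 <;>
          constructor <;>
          simp [hm2, hq2, digitChar_zero, digitChar_one, pyStep_zero,
            pyStep_one_true, pyStep_one_false, Prod.ext_iff] <;>
          push_cast <;> omega

-- popcount of the mask m ^ (2m [+1]) counts run boundaries
lemma bitCount_gray (m : Nat) :
    (PySem.Int.bitCount ((m ^^^ 2 * m : Nat) : Int) : Int) = 2 * (runs m : Int) ∧
    (PySem.Int.bitCount ((m ^^^ (2 * m + 1) : Nat) : Int) : Int)
      = 2 * (runs m : Int) + 1 - 2 * ((m % 2 : Nat) : Int) := by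
  induction m using Nat.strong_induction_on with
  | _ m ih =>
    by_cases h0 : m = 0
    · subst h0
      constructor <;> simp [runs_zero] <;> decide
    · have hlt : m / 2 < m := Nat.div_lt_self (by omega) (by omega)
      have hx0 : 0 < m ^^^ 2 * m := by
        rcases Nat.eq_zero_or_pos (m ^^^ 2 * m) with h | h
        · rw [Nat.xor_eq_zero_iff] at h; omega
        · exact h
      have hx1 : 0 < m ^^^ (2 * m + 1) := by
        rcases Nat.eq_zero_or_pos (m ^^^ (2 * m + 1)) with h | h
        · rw [Nat.xor_eq_zero_iff] at h; omega
        · exact h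
      have hdiv : (m ^^^ 2 * m) / 2 = m / 2 ^^^ m := by
        rw [Nat.xor_div_two]; congr 1; omega
      have hdiv1 : (m ^^^ (2 * m + 1)) / 2 = m / 2 ^^^ m := by
        rw [Nat.xor_div_two]; congr 1; omega
      have hmod : (m ^^^ 2 * m) % 2 = m % 2 := by
        rw [Nat.xor_mod_two_eq]; omega
      have hmod1 : (m ^^^ (2 * m + 1)) % 2 = 1 - m % 2 := by
        rw [Nat.xor_mod_two_eq]; omega
      rw [PySem.Int.bitCount_natCast hx0, PySem.Int.bitCount_natCast hx1, hdiv, hdiv1,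
        hmod, hmod1, runs_step m h0]
      rcases Nat.mod_two_eq_zero_or_one m with hm2 | hm2
      · have hm' : m / 2 ^^^ m = m / 2 ^^^ 2 * (m / 2) := by congr 1; omega
        have hif : (if m % 2 = 1 ∧ (m / 2) % 2 = 0 then 1 else 0) = 0 := by simp [hm2]
        rw [hm', hif]
        have h := (ih (m / 2) hlt).1
        constructor <;> push_cast [hm2] at h ⊢ <;> omega
      · have hm' : m / 2 ^^^ m = m / 2 ^^^ (2 * (m / 2) + 1) := by congr 1; omega
        rw [hm']
        have h := (ih (m / 2) hlt).2
        rcases Nat.mod_two_eq_zero_or_one (m / 2) with hq2 | hq2 <;>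
          [(have hif : (if m % 2 = 1 ∧ (m / 2) % 2 = 0 then 1 else 0) = 1 := by
              simp [hm2, hq2]);
           (have hif : (if m % 2 = 1 ∧ (m / 2) % 2 = 0 then 1 else 0) = 0 := by
              simp [hm2, hq2])] <;>
          rw [hif] <;> constructor <;> push_cast [hm2, hq2] at h ⊢ <;> omega

lemma alt_eq_runs (n : Int) : GroupedBits_alt n = (runs n.natAbs : Int) := by
  simp only [GroupedBits_alt]
  rw [Int.abs_eq_natAbs, show ((n.natAbs : Int) <<< (1 : Nat)) = ((n.natAbs <<< 1 : Nat) : Int)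
    from (Int.natCast_shiftLeft _ _).symm, PySem.Int.bxor_natCast,
    show n.natAbs <<< 1 = 2 * n.natAbs by rw [Nat.shiftLeft_eq]; ring]
  have h := (bitCount_gray n.natAbs).1
  have h2 := PySem.Int.floordiv_natCast (PySem.Int.bitCount ((n.natAbs ^^^ 2 * n.natAbs : Nat) : Int)) 2
  rw [show ((2 : Nat) : Int) = 2 by norm_num] at h2
  rw [h2]
  omega

lemma a_eq_runs (n : Int) : GroupedBits n = (runs n.natAbs : Int) := by
  have key : ∀ m : Nat, ((binDigits m).foldl pyStep (0, true)).1 = (runs m : Int) := by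
    intro m
    by_cases h0 : m = 0
    · subst h0
      rw [binDigits_lt_two 0 (by norm_num), digitChar_zero]
      simp [List.foldl_cons, List.foldl_nil, pyStep_zero, runs_zero]
    · rw [(fold_bin m (by omega) 0).1]; simp
  unfold GroupedBits PySem.Int.toBinChars0b
  by_cases hn : n < 0
  · simp only [if_pos hn, List.foldl_cons, pyStep_dash, pyStep_b, pyStep_zero]
    rw [toDigits_two]
    exact key n.natAbs
  · simp only [if_neg hn, List.foldl_cons, pyStep_b, pyStep_zero]
    rw [toDigits_two, show n.toNat = n.natAbs by omega]
    exact key n.natAbs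

-- ===== VERDICT (by name: the statement is the Claim_ definition above) =====
theorem GroupedBits_spec : Claim_equal_GroupedBits := by
  intro n _
  unfold Spec_GroupedBits
  rw [a_eq_runs, alt_eq_runs]
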